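-- pv_equiv track=rewrite | github.com/logflux/logflux | tests/test_reentrable.py | gen_exp_groups
-- ===== SOURCE A (Python) =====
-- def gen_exp_groups(exp_grp_num):
--     group = []
--     for i in range(exp_grp_num):
--         for j in range(exp_grp_num):
--             if i==j:
--                 continue
--
--             grp_1 = (i,j)
--             grp_2 = (j,i)
--
--             if grp_1 not in group and grp_2 not in group:
--                 group.append(grp_1)
--
--     return group
-- ===== SOURCE B (Python) =====
-- def gen_exp_groups(exp_grp_num):
--     return [(i, j) for i in range(exp_grp_num) for j in range(i + 1, exp_grp_num)]
-- ===== Notes on version B (the rewrite author's own statement) =====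
-- stated objective: faster
-- what changed: Replaced the quadruple-cost scan (nested i,j loops with a linear 'not in group' membership test on every step) by a direct comprehension emitting (i,j) for i<j, with no membership tests.
import Mathlib
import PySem

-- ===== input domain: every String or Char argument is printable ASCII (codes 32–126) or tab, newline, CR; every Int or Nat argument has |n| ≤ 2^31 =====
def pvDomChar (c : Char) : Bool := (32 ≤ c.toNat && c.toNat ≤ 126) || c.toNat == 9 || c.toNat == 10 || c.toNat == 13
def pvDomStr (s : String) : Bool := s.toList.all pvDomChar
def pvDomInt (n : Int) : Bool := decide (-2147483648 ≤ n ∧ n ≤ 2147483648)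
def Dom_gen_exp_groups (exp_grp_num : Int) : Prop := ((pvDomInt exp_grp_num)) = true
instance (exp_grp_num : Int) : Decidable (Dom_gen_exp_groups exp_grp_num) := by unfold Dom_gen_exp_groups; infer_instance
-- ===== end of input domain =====

-- B replaces A's nested full scans with membership tests by a direct comprehension of the pairs (i,j), i<j.

-- ===== PORT A =====
def gen_exp_groups (exp_grp_num : Int) : List (Int × Int) :=
  (PySem.List.pyRange 0 exp_grp_num 1).foldl (fun group i =>
    (PySem.List.pyRange 0 exp_grp_num 1).foldl (fun group j =>
      if i = j then group
      else if (i, j) ∉ group ∧ (j, i) ∉ group then group ++ [(i, j)]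
      else group) group) []

-- ===== PORT B =====
def gen_exp_groups_alt (exp_grp_num : Int) : List (Int × Int) :=
  (PySem.List.pyRange 0 exp_grp_num 1).flatMap (fun i =>
    (PySem.List.pyRange (i + 1) exp_grp_num 1).map (fun j => (i, j)))

-- ===== PRECONDITION & SPEC =====
def Spec_gen_exp_groups (exp_grp_num : Int) (out : List (Int × Int)) : Prop := out = gen_exp_groups_alt exp_grp_num
instance (exp_grp_num : Int) (out : List (Int × Int)) : Decidable (Spec_gen_exp_groups exp_grp_num out) := by unfold Spec_gen_exp_groups; infer_instance

-- ===== CLAIM (what is proved, stated in full; the proofs are below) =====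
def Claim_equal_gen_exp_groups : Prop := ∀ (exp_grp_num : Int), Dom_gen_exp_groups exp_grp_num → Spec_gen_exp_groups exp_grp_num (gen_exp_groups exp_grp_num)

-- ===== LEMMAS AND PROOFS =====

-- the pairs produced by the first a outer iterations
def pvGG (a n : Int) : List (Int × Int) :=
  (PySem.List.pyRange 0 a 1).flatMap (fun x => (PySem.List.pyRange (x + 1) n 1).map (fun y => (x, y)))

lemma mem_pvGG (a n x y : Int) : (x, y) ∈ pvGG a n ↔ 0 ≤ x ∧ x < a ∧ x < y ∧ y < n := by
  simp only [pvGG, List.mem_flatMap, List.mem_map, PySem.List.mem_pyRange_one, Prod.mk.injEq]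
  constructor
  · rintro ⟨x', ⟨hx0, hxa⟩, y', ⟨hy1, hyn⟩, hx, hy⟩; subst hx; subst hy; omega
  · rintro ⟨h0, ha, hxy, hyn⟩; exact ⟨x, ⟨h0, ha⟩, y, ⟨by omega, hyn⟩, rfl, rfl⟩

lemma filter_pyRange_gt (i n : Int) (hi : 0 ≤ i) (hin : i < n) :
    (PySem.List.pyRange 0 n 1).filter (fun j => decide (i < j)) = PySem.List.pyRange (i + 1) n 1 := by
  rw [PySem.List.pyRange_one_append 0 (i + 1) n (by omega) (by omega), List.filter_append]
  have h1 : (PySem.List.pyRange 0 (i + 1) 1).filter (fun j => decide (i < j)) = [] := by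
    rw [List.filter_eq_nil_iff]
    intro j hj
    rw [PySem.List.mem_pyRange_one] at hj
    simp; omega
  have h2 : (PySem.List.pyRange (i + 1) n 1).filter (fun j => decide (i < j)) =
      PySem.List.pyRange (i + 1) n 1 := by
    rw [List.filter_eq_self]
    intro j hj
    rw [PySem.List.mem_pyRange_one] at hj
    simp; omega
  rw [h1, h2, List.nil_append]

-- inner-loop invariant: from state pvGG i n ++ (appended pairs for j < a) the inner loop ends in
-- pvGG i n ++ all pairs (i,j), i < j < n
lemma inner_go (n i : Int) (hi : 0 ≤ i) (hin : i < n) :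
    ∀ (m : Nat) (a : Int), 0 ≤ a → a ≤ n → (n - a).toNat ≤ m →
    (PySem.List.pyRange a n 1).foldl (fun group j =>
        if i = j then group
        else if (i, j) ∉ group ∧ (j, i) ∉ group then group ++ [(i, j)]
        else group)
      (pvGG i n ++ ((PySem.List.pyRange 0 a 1).filter (fun j => decide (i < j))).map (fun j => (i, j)))
    = pvGG i n ++ ((PySem.List.pyRange 0 n 1).filter (fun j => decide (i < j))).map (fun j => (i, j)) := by
  intro m
  induction m with
  | zero =>
    intro a h0 hn hm
    have ha : a = n := by omega
    rw [ha, PySem.List.pyRange_one_eq_nil (le_refl n), List.foldl_nil]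
  | succ m ih =>
    intro a h0 hn hm
    by_cases han : a < n
    · rw [PySem.List.pyRange_one_cons han, List.foldl_cons]
      have hsplit : PySem.List.pyRange 0 (a + 1) 1 = PySem.List.pyRange 0 a 1 ++ [a] :=
        PySem.List.pyRange_one_succ_right h0
      by_cases hia : i = a
      · -- j = i : skipped, appended part unchanged
        rw [if_pos hia]
        have : ((PySem.List.pyRange 0 (a + 1) 1).filter (fun j => decide (i < j))) =
            (PySem.List.pyRange 0 a 1).filter (fun j => decide (i < j)) := by
          rw [hsplit, List.filter_append]
          simp [hia]
        have h := ih (a + 1) (by omega) (by omega) (by omega)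
        rw [this] at h
        exact h
      · rw [if_neg hia]
        by_cases hlt : a < i
        · -- j < i : (j,i) already in pvGG i n, nothing appended
          have hmem : (a, i) ∈ pvGG i n := (mem_pvGG i n a i).mpr (by omega)
          rw [if_neg (by
            intro ⟨_, h2⟩
            exact h2 (List.mem_append_left _ hmem))]
          have : ((PySem.List.pyRange 0 (a + 1) 1).filter (fun j => decide (i < j))) =
              (PySem.List.pyRange 0 a 1).filter (fun j => decide (i < j)) := by
            rw [hsplit, List.filter_append]
            simp [show ¬ i < a by omega]
          have h := ih (a + 1) (by omega) (by omega) (by omega)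
          rw [this] at h
          exact h
        · -- i < j : neither (i,a) nor (a,i) present, so (i,a) is appended
          have hia' : i < a := by omega
          rw [if_pos]
          · have : ((PySem.List.pyRange 0 (a + 1) 1).filter (fun j => decide (i < j))) =
                (PySem.List.pyRange 0 a 1).filter (fun j => decide (i < j)) ++ [a] := by
              rw [hsplit, List.filter_append]
              simp [hia']
            have h := ih (a + 1) (by omega) (by omega) (by omega)
            rw [this] at h
            rw [← h, List.map_append, List.append_assoc]
            rfl
          · constructor
            · intro hmem
              rcases List.mem_append.mp hmem with h | h
              · have := (mem_pvGG i n i a).mp h; omega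
              · rcases List.mem_map.mp h with ⟨j, hj, hj2⟩
                have hj' := (PySem.List.mem_pyRange_one).mp (List.mem_of_mem_filter hj)
                have : j = a := by
                  have := congrArg Prod.snd hj2; simpa using this
                omega
            · intro hmem
              rcases List.mem_append.mp hmem with h | h
              · have := (mem_pvGG i n a i).mp h; omega
              · rcases List.mem_map.mp h with ⟨j, hj, hj2⟩
                have : i = a := by
                  have := congrArg Prod.fst hj2; simpa using this
                omega
    · have ha : a = n := by omega
      rw [ha, PySem.List.pyRange_one_eq_nil (le_refl n), List.foldl_nil]

lemma pvGG_succ (a n : Int) (h0 : 0 ≤ a) :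
    pvGG (a + 1) n = pvGG a n ++ (PySem.List.pyRange (a + 1) n 1).map (fun y => (a, y)) := by
  unfold pvGG
  rw [PySem.List.pyRange_one_succ_right h0, List.flatMap_append]
  simp

lemma outer_go (n : Int) :
    ∀ (m : Nat) (a : Int), 0 ≤ a → a ≤ n → (n - a).toNat ≤ m →
    (PySem.List.pyRange a n 1).foldl (fun group i =>
        (PySem.List.pyRange 0 n 1).foldl (fun group j =>
          if i = j then group
          else if (i, j) ∉ group ∧ (j, i) ∉ group then group ++ [(i, j)]
          else group) group)
      (pvGG a n) = pvGG n n := by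
  intro m
  induction m with
  | zero =>
    intro a h0 hn hm
    have ha : a = n := by omega
    rw [ha, PySem.List.pyRange_one_eq_nil (le_refl n), List.foldl_nil]
  | succ m ih =>
    intro a h0 hn hm
    by_cases han : a < n
    · rw [PySem.List.pyRange_one_cons han, List.foldl_cons]
      have hinner := inner_go n a h0 han (n.toNat) 0 (le_refl 0) (by omega) (by omega)
      rw [show (PySem.List.pyRange 0 0 1) = [] from PySem.List.pyRange_one_eq_nil (le_refl 0)] at hinner
      simp only [List.filter_nil, List.map_nil, List.append_nil] at hinner
      rw [hinner, filter_pyRange_gt a n h0 han, ← pvGG_succ a n h0]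
      exact ih (a + 1) (by omega) (by omega) (by omega)
    · have ha : a = n := by omega
      rw [ha, PySem.List.pyRange_one_eq_nil (le_refl n), List.foldl_nil]

-- ===== VERDICT (by name: the statement is the Claim_ definition above) =====
theorem gen_exp_groups_spec : Claim_equal_gen_exp_groups := by
  intro n _
  unfold Spec_gen_exp_groups gen_exp_groups
  show _ = gen_exp_groups_alt n
  by_cases hn : 0 ≤ n
  · have h0 : pvGG 0 n = [] := by
      unfold pvGG
      rw [PySem.List.pyRange_one_eq_nil (le_refl 0)]
      rfl
    have h := outer_go n n.toNat 0 (le_refl 0) hn (by omega)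
    rw [h0] at h
    rw [h]
    rfl
  · rw [PySem.List.pyRange_one_eq_nil (by omega), List.foldl_nil]
    unfold gen_exp_groups_alt
    rw [PySem.List.pyRange_one_eq_nil (by omega)]
    rfl
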